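-- pv_equiv track=rewrite | github.com/nuttawit007/python-PSCP | Final/Mock final/02Rec_ Helloooo.py | index_vowel
-- ===== SOURCE A (Python) =====
-- def index_vowel(word):
--     """return index"""
--     vowels = ["a", "e", "i", "o", "u"]
--     count, vowel_index = -1, 0
--     for cha in word:
--         count += 1
--         if cha in vowels:
--             vowel_index = count
--     return vowel_index
-- ===== SOURCE B (Python) =====
-- def index_vowel(word):
--     """return index"""
--     for i in range(len(word) - 1, -1, -1):
--         if word[i] in "aeiou":
--             return i
--     return 0
-- ===== Notes on version B (the rewrite author's own statement) =====
-- stated objective: alternative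
-- what changed: B scans backward from the end and returns on the first vowel found (short-circuit), instead of A's forward pass over the whole string that keeps overwriting the last-seen vowel index; B returns 0 when no vowel exists, matching A.
import Mathlib
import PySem

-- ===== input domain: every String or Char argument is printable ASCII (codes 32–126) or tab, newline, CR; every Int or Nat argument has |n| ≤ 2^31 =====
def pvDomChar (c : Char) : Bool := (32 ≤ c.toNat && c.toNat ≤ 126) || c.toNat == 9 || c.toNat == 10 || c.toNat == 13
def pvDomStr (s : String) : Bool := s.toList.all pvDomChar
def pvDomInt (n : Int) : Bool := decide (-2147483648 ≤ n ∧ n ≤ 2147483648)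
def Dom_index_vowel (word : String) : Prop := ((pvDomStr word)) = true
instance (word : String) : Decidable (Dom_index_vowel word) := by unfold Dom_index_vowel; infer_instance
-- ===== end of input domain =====

-- B replaces A's forward overwrite-last-seen pass by a backward short-circuiting scan (objective: alternative).

-- ===== PORT A =====
def pvIsVowel (c : Char) : Bool := c == 'a' || c == 'e' || c == 'i' || c == 'o' || c == 'u'

-- for cha in word: count += 1; if cha in vowels: vowel_index = count
def index_vowel (word : String) : Int :=
  (word.toList.foldl
    (fun (st : Int × Int) cha =>
      let count := st.1 + 1
      (count, if pvIsVowel cha then count else st.2))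
    (-1, 0)).2

-- ===== PORT B =====
-- for i in range(len(word)-1, -1, -1): if word[i] in "aeiou": return i; return 0
def indexVowelGo (cs : List Char) : Nat → Int
  | 0 => 0
  | n + 1 => if pvIsVowel (cs.getD n ' ') then (n : Int) else indexVowelGo cs n

def index_vowel_alt (word : String) : Int :=
  indexVowelGo word.toList word.toList.length

-- ===== PRECONDITION & SPEC =====
def Spec_index_vowel (word : String) (out : Int) : Prop := out = index_vowel_alt word
instance (word : String) (out : Int) : Decidable (Spec_index_vowel word out) := by unfold Spec_index_vowel; infer_instance

-- ===== CLAIM (what is proved, stated in full; the proofs are below) =====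
def Claim_equal_index_vowel : Prop := ∀ (word : String), Dom_index_vowel word → Spec_index_vowel word (index_vowel word)

-- ===== LEMMAS AND PROOFS =====
def pvFoldA (cs : List Char) (st : Int × Int) : Int × Int :=
  cs.foldl
    (fun (st : Int × Int) cha =>
      let count := st.1 + 1
      (count, if pvIsVowel cha then count else st.2))
    st

theorem pvFoldA_fst (cs : List Char) (st : Int × Int) :
    (pvFoldA cs st).1 = st.1 + cs.length := by
  induction cs generalizing st with
  | nil => simp [pvFoldA]
  | cons c cs ih =>
    simp only [pvFoldA, List.foldl_cons] at *
    rw [ih]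
    simp
    omega

theorem pvFoldA_append (cs : List Char) (c : Char) (st : Int × Int) :
    pvFoldA (cs ++ [c]) st =
      ((pvFoldA cs st).1 + 1,
       if pvIsVowel c then (pvFoldA cs st).1 + 1 else (pvFoldA cs st).2) := by
  simp [pvFoldA, List.foldl_append]

theorem indexVowelGo_append (cs : List Char) (c : Char) (i : Nat) (h : i ≤ cs.length) :
    indexVowelGo (cs ++ [c]) i = indexVowelGo cs i := by
  induction i with
  | zero => rfl
  | succ n ih =>
    have hn : n < cs.length := h
    simp only [indexVowelGo, List.getD, List.getElem?_append_left hn, ih (Nat.le_of_lt hn)]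
    rfl

theorem pv_main (cs : List Char) :
    (pvFoldA cs (-1, 0)).2 = indexVowelGo cs cs.length := by
  induction cs using List.reverseRecOn with
  | nil => rfl
  | append_singleton cs c ih =>
    rw [pvFoldA_append]
    have hfst : (pvFoldA cs (-1, 0)).1 = -1 + cs.length := pvFoldA_fst cs (-1, 0)
    have hlen : (cs ++ [c]).length = cs.length + 1 := by simp
    rw [hlen]
    simp only [indexVowelGo, List.getD, List.getElem?_concat_length, Option.getD_some]
    rw [indexVowelGo_append cs c cs.length (le_refl _)]
    by_cases hv : pvIsVowel c
    · simp only [hv, if_true]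
      omega
    · simp only [hv, Bool.false_eq_true, if_false, ih]

-- ===== VERDICT (by name: the statement is the Claim_ definition above) =====
theorem index_vowel_spec : Claim_equal_index_vowel := by
  intro word _
  show index_vowel word = index_vowel_alt word
  exact pv_main word.toList
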